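-- pv_equiv track=rewrite | github.com/floriankugler/fusion-addins | fusion_api_docs/clean_docs.py | remove_non_python_fenced_blocks
-- ===== SOURCE A (Python) =====
-- def remove_non_python_fenced_blocks(text: str) -> str:
--     lines = text.splitlines(keepends=True)
--     out = []
--     in_code = False
--     fence_line = ""
--     code_lines = []
--
--     def is_python_code(fence: str, code: str) -> bool:
--         fence_lower = fence.lower()
--         if fence_lower.startswith("```python") or fence_lower.startswith("``` api-code"):
--             return True
--         python_markers = ["import ", "def ", "self", "None", "True", "False", "adsk."]
--         if any(marker in code for marker in python_markers):
--             return True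
--         cpp_markers = ["#include", "std::", "->", "::", "Ptr ", "bool ", "class ", "struct "]
--         if any(marker in code for marker in cpp_markers):
--             return False
--         return False
--
--     for line in lines:
--         if line.lstrip().startswith("```"):
--             if not in_code:
--                 in_code = True
--                 fence_line = line
--                 code_lines = []
--             else:
--                 code_text = "".join(code_lines)
--                 if is_python_code(fence_line, code_text):
--                     out.append("```python\n")
--                     out.extend(code_lines)
--                     out.append("```\n")
--                 in_code = False
--                 fence_line = ""
--                 code_lines = []
--             continue
--         if in_code:
--             code_lines.append(line)
--         else:
--             out.append(line)
--
--     if in_code: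
--         out.append(fence_line)
--         out.extend(code_lines)
--
--     return "".join(out)
-- ===== SOURCE B (Python) =====
-- def remove_non_python_fenced_blocks(text: str) -> str:
--     def is_fence(line):
--         return line.lstrip().startswith("```")
--
--     def is_python_code(fence, code):
--         fl = fence.lower()
--         if fl.startswith("```python") or fl.startswith("``` api-code"):
--             return True
--         return any(m in code for m in ["import ", "def ", "self", "None", "True", "False", "adsk."])
--
--     lines = text.splitlines(keepends=True)
--     n = len(lines)
--     # pass 1: segment into plain text lines and fenced code blocks
--     segments = []
--     i = 0
--     while i < n:
--         line = lines[i]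
--         if is_fence(line):
--             j = i + 1
--             while j < n and not is_fence(lines[j]):
--                 j += 1
--             segments.append(("code", line, lines[i + 1:j], j < n))
--             i = j + 1
--         else:
--             segments.append(("text", line))
--             i += 1
--     # pass 2: render the segment list
--     out = []
--     for seg in segments:
--         if seg[0] == "text":
--             out.append(seg[1])
--         else:
--             _, fence, body, closed = seg
--             if not closed:
--                 out.append(fence)
--                 out.extend(body)
--             elif is_python_code(fence, "".join(body)):
--                 out.append("```python\n")
--                 out.extend(body)
--                 out.append("```\n")
--     return "".join(out)
-- ===== Notes on version B (the rewrite author's own statement) =====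
-- stated objective: alternative
-- what changed: B replaces A's single-pass boolean state machine by a two-pass design: a first pass segments the line list into text lines and fenced blocks (fence, body, closed-flag) by scanning ahead for the closing fence, and a second pass renders the segment list; the classifier drops A's dead C++-marker branch.
import Mathlib
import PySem

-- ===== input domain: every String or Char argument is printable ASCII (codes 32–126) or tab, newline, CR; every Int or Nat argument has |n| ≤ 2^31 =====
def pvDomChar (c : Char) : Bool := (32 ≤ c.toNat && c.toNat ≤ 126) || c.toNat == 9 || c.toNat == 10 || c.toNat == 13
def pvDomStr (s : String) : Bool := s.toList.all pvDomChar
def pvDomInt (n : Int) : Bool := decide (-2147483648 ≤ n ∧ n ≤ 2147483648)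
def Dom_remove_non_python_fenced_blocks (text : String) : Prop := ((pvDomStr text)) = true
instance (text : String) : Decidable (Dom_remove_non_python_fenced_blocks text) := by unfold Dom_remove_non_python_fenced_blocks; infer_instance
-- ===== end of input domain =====

-- B re-implements A as a two-pass segmenter (segment list, then render) instead of A's
-- single-pass boolean state machine; same output, no speed claim.

-- str.splitlines(keepends=True): PySem has no keepends variant, so ported by hand.
-- Exact on Dom: inside Dom the only line-break characters are '\n', '\r' and "\r\n"
-- (Python additionally splits on \v, \f, \x1c-\x1e, and non-ASCII breaks, all outside Dom).
def pvSplitKeep (acc : List Char) : List Char → List (List Char)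
  | [] => if acc = [] then [] else [acc.reverse]
  | '\r' :: '\n' :: rest => (acc.reverse ++ ['\r', '\n']) :: pvSplitKeep [] rest
  | '\r' :: rest => (acc.reverse ++ ['\r']) :: pvSplitKeep [] rest
  | '\n' :: rest => (acc.reverse ++ ['\n']) :: pvSplitKeep [] rest
  | c :: rest => pvSplitKeep (c :: acc) rest

-- line.lstrip().startswith("```")  (shared by both Pythons, as their fence test)
def pvIsFence (line : List Char) : Bool :=
  PySem.Chars.startswith (PySem.Chars.lstrip line) "```".toList

-- ===== PORT A =====

-- A's nested is_python_code, branch for branch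
def pvIsPythonCodeA (fence code : List Char) : Bool :=
  let fl := PySem.Chars.lower fence
  if PySem.Chars.startswith fl "```python".toList || PySem.Chars.startswith fl "``` api-code".toList then
    true
  else if ["import ".toList, "def ".toList, "self".toList, "None".toList, "True".toList,
           "False".toList, "adsk.".toList].any (fun m => PySem.Chars.isIn m code) then
    true
  else if ["#include".toList, "std::".toList, "->".toList, "::".toList, "Ptr ".toList,
           "bool ".toList, "class ".toList, "struct ".toList].any (fun m => PySem.Chars.isIn m code) then
    false
  else
    false

-- one iteration of A's for-loop over state (out, in_code, fence_line, code_lines)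
def pvStepA (s : List (List Char) × Bool × List Char × List (List Char)) (line : List Char) :
    List (List Char) × Bool × List Char × List (List Char) :=
  let (out, in_code, fence_line, code_lines) := s
  if pvIsFence line then
    if !in_code then (out, true, line, [])
    else
      let code_text := code_lines.flatten   -- "".join(code_lines)
      let out' := if pvIsPythonCodeA fence_line code_text then
          out ++ ["```python\n".toList] ++ code_lines ++ ["```\n".toList]
        else out
      (out', false, [], [])
  else if in_code then (out, in_code, fence_line, code_lines ++ [line])
  else (out ++ [line], in_code, fence_line, code_lines)

def remove_non_python_fenced_blocks (text : String) : String :=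
  let lines := pvSplitKeep [] text.toList
  let s := lines.foldl pvStepA ([], false, [], [])
  let out := if s.2.1 then s.1 ++ [s.2.2.1] ++ s.2.2.2 else s.1
  String.ofList out.flatten   -- "".join(out)

-- ===== PORT B =====

inductive PvSeg where
  | text : List Char → PvSeg
  | code : List Char → List (List Char) → Bool → PvSeg

-- B's simplified classifier (no dead C++ branch)
def pvIsPythonCodeB (fence code : List Char) : Bool :=
  let fl := PySem.Chars.lower fence
  if PySem.Chars.startswith fl "```python".toList || PySem.Chars.startswith fl "``` api-code".toList then
    true
  else
    ["import ".toList, "def ".toList, "self".toList, "None".toList, "True".toList,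
     "False".toList, "adsk.".toList].any (fun m => PySem.Chars.isIn m code)

-- pass 1: B's inner while-scan for the closing fence is the takeWhile/dropWhile split
def pvParse : List (List Char) → List PvSeg
  | [] => []
  | line :: rest =>
    if pvIsFence line then
      let after := rest.dropWhile (fun l => !pvIsFence l)
      PvSeg.code line (rest.takeWhile (fun l => !pvIsFence l)) (!after.isEmpty) ::
        pvParse (after.drop 1)
    else
      PvSeg.text line :: pvParse rest
  termination_by lines => lines.length
  decreasing_by
    · have h1 : (rest.dropWhile (fun l => !pvIsFence l)).length ≤ rest.length :=
        List.length_dropWhile_le _ rest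
      simp; omega
    · simp

-- pass 2: render each segment
def pvRender : List PvSeg → List (List Char)
  | [] => []
  | PvSeg.text line :: rest => line :: pvRender rest
  | PvSeg.code fence body closed :: rest =>
    (if closed then
        (if pvIsPythonCodeB fence body.flatten then
          ["```python\n".toList] ++ body ++ ["```\n".toList]
        else [])
      else fence :: body) ++ pvRender rest

def remove_non_python_fenced_blocks_alt (text : String) : String :=
  String.ofList (pvRender (pvParse (pvSplitKeep [] text.toList))).flatten

-- ===== PRECONDITION & SPEC =====
def Spec_remove_non_python_fenced_blocks (text : String) (out : String) : Prop := out = remove_non_python_fenced_blocks_alt text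
instance (text : String) (out : String) : Decidable (Spec_remove_non_python_fenced_blocks text out) := by unfold Spec_remove_non_python_fenced_blocks; infer_instance

-- ===== CLAIM (what is proved, stated in full; the proofs are below) =====
def Claim_equal_remove_non_python_fenced_blocks : Prop := ∀ (text : String), Dom_remove_non_python_fenced_blocks text → Spec_remove_non_python_fenced_blocks text (remove_non_python_fenced_blocks text)

-- ===== LEMMAS AND PROOFS =====

-- the two classifiers agree (A's C++ branch and final branch both return false)
theorem pvIsPythonCode_eq (fence code : List Char) :
    pvIsPythonCodeA fence code = pvIsPythonCodeB fence code := by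
  unfold pvIsPythonCodeA pvIsPythonCodeB
  split_ifs <;> simp_all

-- A's finalisation of a fold state, at the list-of-lines level
def pvFinishA (s : List (List Char) × Bool × List Char × List (List Char)) : List (List Char) :=
  if s.2.1 then s.1 ++ [s.2.2.1] ++ s.2.2.2 else s.1

-- what A appends when a block closes
def pvEmitA (fence : List Char) (body : List (List Char)) : List (List Char) :=
  if pvIsPythonCodeA fence body.flatten then
    ["```python\n".toList] ++ body ++ ["```\n".toList]
  else []

-- A's in-code phase: the fold consumes the body up to the next fence line
theorem pvFoldA_incode (rest : List (List Char)) :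
    ∀ (out : List (List Char)) (fence : List Char) (cl : List (List Char)),
    rest.foldl pvStepA (out, true, fence, cl) =
      match rest.dropWhile (fun l => !pvIsFence l) with
      | [] => (out, true, fence, cl ++ rest.takeWhile (fun l => !pvIsFence l))
      | _ :: rest' => rest'.foldl pvStepA
          (out ++ pvEmitA fence (cl ++ rest.takeWhile (fun l => !pvIsFence l)), false, [], []) := by
  induction rest with
  | nil => intro out fence cl; simp
  | cons l rest ih =>
    intro out fence cl
    by_cases hf : pvIsFence l = true
    · have hstep : pvStepA (out, true, fence, cl) l = (out ++ pvEmitA fence cl, false, [], []) := by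
        simp [pvStepA, hf, pvEmitA]
        split_ifs <;> simp
      rw [List.foldl_cons, hstep]
      simp [hf]
    · simp only [List.foldl_cons, List.dropWhile_cons, List.takeWhile_cons, hf]
      have hstep : pvStepA (out, true, fence, cl) l = (out, true, fence, cl ++ [l]) := by
        simp [pvStepA, hf]
      rw [hstep, ih out fence (cl ++ [l])]
      simp

-- the main invariant: A's fold-and-finish from a plain-text state is B's parse-and-render
theorem pvMain (n : Nat) : ∀ (lines : List (List Char)), lines.length ≤ n →
    ∀ (out : List (List Char)),
    pvFinishA (lines.foldl pvStepA (out, false, [], [])) = out ++ pvRender (pvParse lines) := by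
  induction n with
  | zero =>
    intro lines h out
    have : lines = [] := List.eq_nil_of_length_eq_zero (Nat.le_zero.mp h)
    subst this; simp [pvFinishA, pvParse, pvRender]
  | succ n ih =>
    intro lines h out
    match lines with
    | [] => simp [pvFinishA, pvParse, pvRender]
    | l :: rest =>
      by_cases hf : pvIsFence l = true
      · have hstep : pvStepA (out, false, [], []) l = (out, true, l, []) := by
          simp [pvStepA, hf]
        rw [List.foldl_cons, hstep, pvFoldA_incode]
        have hdl : (rest.dropWhile (fun l => !pvIsFence l)).length ≤ rest.length :=
          List.length_dropWhile_le _ rest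
        cases hd : rest.dropWhile (fun l => !pvIsFence l) with
        | nil =>
          have htw : rest.takeWhile (fun l => !pvIsFence l) = rest := by
            have := List.takeWhile_append_dropWhile (p := fun l => !pvIsFence l) (l := rest)
            rw [hd] at this; simpa using this
          simp only [pvFinishA]
          unfold pvParse
          simp [hf, hd, pvRender, htw, pvParse]
        | cons c rest' =>
          rw [hd] at hdl
          have hlen : rest'.length ≤ n := by
            simp at hdl; simp at h; omega
          rw [ih rest' hlen]
          conv_rhs => rw [pvParse.eq_def]
          simp only [hf, if_pos, hd, List.isEmpty_cons, Bool.not_false]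
          simp [pvRender, pvEmitA, pvIsPythonCode_eq]
      · have hstep : pvStepA (out, false, [], []) l = (out ++ [l], false, [], []) := by
          simp [pvStepA, hf]
        rw [List.foldl_cons, hstep]
        have hlen : rest.length ≤ n := by simp at h; omega
        rw [ih rest hlen]
        conv_rhs => rw [pvParse.eq_def]
        simp only [hf]
        simp [pvRender]

-- ===== VERDICT (by name: the statement is the Claim_ definition above) =====
theorem remove_non_python_fenced_blocks_spec : Claim_equal_remove_non_python_fenced_blocks := by
  intro text _
  unfold Spec_remove_non_python_fenced_blocks remove_non_python_fenced_blocks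
    remove_non_python_fenced_blocks_alt
  have := pvMain (pvSplitKeep [] text.toList).length (pvSplitKeep [] text.toList) le_rfl []
  simp only [pvFinishA, List.nil_append] at this
  exact congrArg (fun l => String.ofList l.flatten) this
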